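-- pv_equiv track=rewrite | github.com/filo8856/Emerald_tasks | backend/src/ai_scripts/main.py | _best_title_match
-- ===== SOURCE A (Python) =====
-- from typing import Any, Dict, List, Optional, Union
--
-- def _best_title_match(fragment: str, titles: List[str]) -> Optional[str]:
--     frag = fragment.strip().lower()
--     if not frag:
--         return None
--     # exact
--     for tt in titles:
--         if frag == tt.lower():
--             return tt
--     # substring
--     for tt in titles:
--         if frag in tt.lower():
--             return tt
--     return None
-- ===== SOURCE B (Python) =====
-- from typing import List, Optional
--
-- def _best_title_match(fragment: str, titles: List[str]) -> Optional[str]: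
--     frag = fragment.strip().lower()
--     if not frag:
--         return None
--     substring_hit = None
--     for tt in titles:
--         low = tt.lower()
--         if frag == low:
--             return tt
--         if frag in low and substring_hit is None:
--             substring_hit = tt
--     return substring_hit
-- ===== Notes on version B (the rewrite author's own statement) =====
-- stated objective: alternative
-- what changed: Replaced A's two sequential passes (exact pass, then substring pass) by a single pass that returns immediately on an exact match and records only the first substring hit in an accumulator.
import Mathlib
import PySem

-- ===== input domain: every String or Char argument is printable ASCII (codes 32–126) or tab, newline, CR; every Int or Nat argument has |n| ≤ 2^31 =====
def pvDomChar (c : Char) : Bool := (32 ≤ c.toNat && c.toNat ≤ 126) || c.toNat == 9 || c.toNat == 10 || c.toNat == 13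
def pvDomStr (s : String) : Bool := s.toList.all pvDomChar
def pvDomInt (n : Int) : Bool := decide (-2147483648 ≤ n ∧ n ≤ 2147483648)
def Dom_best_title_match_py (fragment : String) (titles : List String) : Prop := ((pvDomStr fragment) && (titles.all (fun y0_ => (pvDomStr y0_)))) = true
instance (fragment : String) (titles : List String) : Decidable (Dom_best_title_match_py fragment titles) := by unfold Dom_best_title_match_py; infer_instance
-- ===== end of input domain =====

-- B does one pass (exact match returns immediately; first substring hit is recorded) instead of A's two passes; alternative decomposition, same cost.


-- ===== PORT A =====
-- first loop of A: 'for tt in titles: if frag == tt.lower(): return tt'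
def pvExactLoopA (frag : List Char) : List String → Option String
  | [] => none
  | tt :: rest =>
    if frag = PySem.Chars.lower tt.toList then some tt else pvExactLoopA frag rest

-- second loop of A: 'for tt in titles: if frag in tt.lower(): return tt'
def pvSubLoopA (frag : List Char) : List String → Option String
  | [] => none
  | tt :: rest =>
    if PySem.Chars.isIn frag (PySem.Chars.lower tt.toList) then some tt else pvSubLoopA frag rest

def best_title_match_py (fragment : String) (titles : List String) : Option String :=
  let frag := PySem.Chars.lower (PySem.Chars.strip fragment.toList)
  if frag = [] then none
  else
    match pvExactLoopA frag titles with
    | some tt => some tt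
    | none => pvSubLoopA frag titles

-- ===== PORT B =====
-- B's single loop: exact match returns at once; the accumulator holds the first substring hit.
def pvScanB (frag : List Char) : List String → Option String → Option String
  | [], hit => hit
  | tt :: rest, hit =>
    let low := PySem.Chars.lower tt.toList
    if frag = low then some tt
    else pvScanB frag rest
      (if PySem.Chars.isIn frag low && hit.isNone then some tt else hit)

def best_title_match_py_alt (fragment : String) (titles : List String) : Option String :=
  let frag := PySem.Chars.lower (PySem.Chars.strip fragment.toList)
  if frag = [] then none
  else pvScanB frag titles none

-- ===== PRECONDITION & SPEC =====
def Spec_best_title_match_py (fragment : String) (titles : List String) (out : Option String) : Prop := out = best_title_match_py_alt fragment titles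
instance (fragment : String) (titles : List String) (out : Option String) : Decidable (Spec_best_title_match_py fragment titles out) := by unfold Spec_best_title_match_py; infer_instance

-- ===== CLAIM (what is proved, stated in full; the proofs are below) =====
def Claim_equal_best_title_match_py : Prop := ∀ (fragment : String) (titles : List String), Dom_best_title_match_py fragment titles → Spec_best_title_match_py fragment titles (best_title_match_py fragment titles)

-- ===== LEMMAS AND PROOFS =====

-- One-pass scan with accumulator = exact pass, falling back to the accumulator, then to the substring pass.
theorem pvScanB_eq (frag : List Char) (ts : List String) (hit : Option String) :
    pvScanB frag ts hit =
      match pvExactLoopA frag ts with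
      | some tt => some tt
      | none => match hit with
                | some h => some h
                | none => pvSubLoopA frag ts := by
  induction ts generalizing hit with
  | nil => cases hit <;> simp [pvScanB, pvExactLoopA, pvSubLoopA]
  | cons tt rest ih =>
    simp only [pvScanB, pvExactLoopA, pvSubLoopA]
    by_cases hex : frag = PySem.Chars.lower tt.toList
    · simp [hex]
    · simp only [hex, if_false]
      rw [ih]
      cases hit with
      | some h => simp
      | none =>
        by_cases hin : PySem.Chars.isIn frag (PySem.Chars.lower tt.toList) = true
        · simp [hin]
        · simp [hin]

-- ===== VERDICT (by name: the statement is the Claim_ definition above) =====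
theorem best_title_match_py_spec : Claim_equal_best_title_match_py := by
  intro fragment titles _
  unfold Spec_best_title_match_py best_title_match_py best_title_match_py_alt
  by_cases h : PySem.Chars.lower (PySem.Chars.strip fragment.toList) = []
  · simp [h]
  · simp only [h, if_false]
    rw [pvScanB_eq]
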